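-- pv_equiv track=rewrite | github.com/riba2534/My_ACM_Code | CodeForces/Codeforces Round #513 by Barcelona Bootcamp (rated, Div. 1 + Div. 2)/B.py | g9
-- ===== SOURCE A (Python) =====
-- def g9(n):
--     sn = str(n)
--     tn = ''
--     for i in range(len(sn)-1):
--         tn += '9'
--     if tn != '':
--         return int(tn)
--     else:
--         return 0
-- ===== SOURCE B (Python) =====
-- def g9(n):
--     d = len(str(n))
--     return 10 ** (d - 1) - 1
-- ===== Notes on version B (the rewrite author's own statement) =====
-- stated objective: simpler
-- what changed: Replaced the character-appending loop plus string-to-int conversion by a direct closed-form power-of-ten expression computed from the digit count of str(n).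
import Mathlib
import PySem

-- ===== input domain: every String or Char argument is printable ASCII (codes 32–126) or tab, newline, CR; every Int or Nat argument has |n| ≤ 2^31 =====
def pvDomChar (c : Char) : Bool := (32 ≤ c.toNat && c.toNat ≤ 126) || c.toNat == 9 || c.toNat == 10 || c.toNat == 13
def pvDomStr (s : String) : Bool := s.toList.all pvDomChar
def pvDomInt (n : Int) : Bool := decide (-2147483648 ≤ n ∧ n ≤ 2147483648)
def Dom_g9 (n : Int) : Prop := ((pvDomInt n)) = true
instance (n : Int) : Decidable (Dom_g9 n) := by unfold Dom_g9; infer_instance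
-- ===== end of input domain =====

-- B replaces A's build-a-string-of-nines loop + int() parse with a closed-form power-of-ten expression on d = len(str(n)): simpler, no string construction.


-- ===== PORT A =====
-- strings are ported as their character lists (tn += '9' → acc ++ ['9']); int(tn) → ofChars?,
-- which never returns none here (tn is a nonempty digit string), so .getD 0 is unreachable padding
def g9 (n : Int) : Int :=
  let sn := PySem.Int.toChars n
  let tn := (PySem.List.pyRange 0 ((sn.length : Int) - 1) 1).foldl
              (fun acc _ => acc ++ ['9']) ([] : List Char)
  if tn ≠ [] then (PySem.Int.ofChars? tn).getD 0 else 0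

-- ===== PORT B =====
def g9_alt (n : Int) : Int :=
  let d := (PySem.Int.toChars n).length
  10 ^ (d - 1) - 1

-- ===== PRECONDITION & SPEC =====
def Spec_g9 (n : Int) (out : Int) : Prop := out = g9_alt n
instance (n : Int) (out : Int) : Decidable (Spec_g9 n out) := by unfold Spec_g9; infer_instance

-- ===== CLAIM (what is proved, stated in full; the proofs are below) =====
def Claim_equal_g9 : Prop := ∀ (n : Int), Dom_g9 n → Spec_g9 n (g9 n)

-- ===== LEMMAS AND PROOFS =====

-- both ports depend on n only through k = (toChars n).length; on the domain k ≤ 11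
theorem g9_len_bound (n : Int) (h : Dom_g9 n) : (PySem.Int.toChars n).length ≤ 11 := by
  unfold Dom_g9 pvDomInt at h
  simp only [decide_eq_true_eq] at h
  unfold PySem.Int.toChars
  split
  · have hlt : n.natAbs < 10 ^ 10 := by omega
    have := Nat.toDigits_length 10 n.natAbs 10 (by norm_num) hlt
    simp only [List.length_cons]
    omega
  · have hlt : n.toNat < 10 ^ 10 := by omega
    have := Nat.toDigits_length 10 n.toNat 10 (by norm_num) hlt
    omega

theorem g9_key (k : Nat) (hk : k ≤ 11) :
    (if ((PySem.List.pyRange 0 ((k : Int) - 1) 1).foldl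
          (fun acc _ => acc ++ ['9']) ([] : List Char)) ≠ [] then
       (PySem.Int.ofChars?
         ((PySem.List.pyRange 0 ((k : Int) - 1) 1).foldl
            (fun acc _ => acc ++ ['9']) ([] : List Char))).getD 0
     else 0) = (10 : Int) ^ (k - 1) - 1 := by
  interval_cases k <;> decide

-- ===== VERDICT (by name: the statement is the Claim_ definition above) =====
theorem g9_spec : Claim_equal_g9 := by
  intro n hDom
  unfold Spec_g9 g9 g9_alt
  simpa using g9_key (PySem.Int.toChars n).length (g9_len_bound n hDom)
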